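-- pv_equiv track=rewrite | github.com/BlueprintLabIO/Janus | janus/interfaces/input/authentication.py | _expand_wildcards
-- ===== SOURCE A (Python) =====
-- from typing import Dict, Any, List, Optional
--
-- def _expand_wildcards(
--
--     wildcard_perms: List[str],
--     target_perms: List[str]
-- ) -> List[str]:
--     """
--     Expand wildcard permissions against target permission list.
--
--     Args:
--         wildcard_perms: Permissions that may contain wildcards
--         target_perms: Specific permissions to match against
--
--     Returns:
--         Expanded permission list
--
--     Example:
--         wildcard_perms = ["tools.*", "chat"]
--         target_perms = ["tools.calculator", "tools.time", "chat", "memory.read"]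
--         result = ["tools.calculator", "tools.time", "chat"]
--     """
--     expanded = []
--
--     for perm in wildcard_perms:
--         if perm.endswith(".*"):
--             # Wildcard permission - find all matching target permissions
--             prefix = perm[:-2]  # Remove ".*"
--             matching = [p for p in target_perms if p.startswith(f"{prefix}.")]
--             expanded.extend(matching)
--         else:
--             # Exact permission
--             expanded.append(perm)
--
--     return list(set(expanded))  # Remove duplicates
-- ===== SOURCE B (Python) =====
-- def _expand_wildcards(wildcard_perms, target_perms):
--     # Partition wildcards once into exact perms and dotted prefixes,
--     # then scan the targets a single time with tuple-startswith.
--     exact = []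
--     prefixes = []
--     for perm in wildcard_perms:
--         if perm.endswith(".*"):
--             prefixes.append(perm[:-2] + ".")
--         else:
--             exact.append(perm)
--     matched = [t for t in target_perms if t.startswith(tuple(prefixes))]
--     return list(set(exact + matched))
-- ===== Notes on version B (the rewrite author's own statement) =====
-- stated objective: alternative
-- what changed: B partitions the wildcards once into exact perms and a tuple of dotted prefixes, then scans the target list a single time with tuple-startswith, instead of re-scanning all targets for every wildcard; duplicates are removed at the end as in A.
import Mathlib
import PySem

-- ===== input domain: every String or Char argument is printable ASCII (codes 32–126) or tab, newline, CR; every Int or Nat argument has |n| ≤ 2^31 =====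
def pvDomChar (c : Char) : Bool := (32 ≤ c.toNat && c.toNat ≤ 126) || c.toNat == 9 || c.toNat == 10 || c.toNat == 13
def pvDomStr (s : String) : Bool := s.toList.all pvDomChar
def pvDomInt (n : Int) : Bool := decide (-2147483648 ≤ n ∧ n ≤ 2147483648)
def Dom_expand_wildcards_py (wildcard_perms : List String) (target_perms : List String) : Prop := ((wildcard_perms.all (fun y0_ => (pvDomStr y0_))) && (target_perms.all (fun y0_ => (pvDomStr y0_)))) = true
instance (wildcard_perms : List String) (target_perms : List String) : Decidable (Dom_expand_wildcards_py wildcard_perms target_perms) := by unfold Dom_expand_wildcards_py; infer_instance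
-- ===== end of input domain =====

-- B partitions the wildcards into exact perms and dotted prefixes once, then scans the
-- targets a single time; same result set as A (Python's list(set(..)) order is
-- unspecified, so both ports return the sorted distinct elements).


-- ===== PORT A =====
-- literal port of A: one loop over wildcard_perms; per wildcard an inner filter of
-- target_perms; final list(set(expanded)) — Python's set order is unspecified, so the
-- port returns the sorted distinct elements (the result is compared as a set).
def expand_wildcards_py (wildcard_perms : List String) (target_perms : List String) : List String :=
  let expanded := wildcard_perms.foldl (fun expanded perm =>
    if PySem.Str.endswith perm ".*" then
      let pfx := PySem.Str.slice perm none (some (-2))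
      let matching := target_perms.filter (fun p => PySem.Str.startswith p (pfx ++ "."))
      expanded ++ matching
    else
      expanded ++ [perm]) []
  PySem.List.sorted (PySem.Set.ofList expanded) (fun x => x) false

-- ===== PORT B =====
-- port of B: one loop partitioning wildcards into (exact, prefixes), then ONE filter
-- pass over target_perms (t.startswith(tuple(prefixes)) = any prefix matches; False for
-- the empty tuple); same canonical rendering of list(set(..)) as in port A.
def expand_wildcards_py_alt (wildcard_perms : List String) (target_perms : List String) : List String :=
  let ep := wildcard_perms.foldl (fun ep perm =>
    if PySem.Str.endswith perm ".*" then
      (ep.1, ep.2 ++ [PySem.Str.slice perm none (some (-2)) ++ "."])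
    else
      (ep.1 ++ [perm], ep.2)) (([], []) : List String × List String)
  let matched := target_perms.filter (fun t => ep.2.any (fun p => PySem.Str.startswith t p))
  PySem.List.sorted (PySem.Set.ofList (ep.1 ++ matched)) (fun x => x) false

-- ===== PRECONDITION & SPEC =====
def Spec_expand_wildcards_py (wildcard_perms : List String) (target_perms : List String) (out : List String) : Prop := out = expand_wildcards_py_alt wildcard_perms target_perms
instance (wildcard_perms : List String) (target_perms : List String) (out : List String) : Decidable (Spec_expand_wildcards_py wildcard_perms target_perms out) := by unfold Spec_expand_wildcards_py; infer_instance

-- ===== CLAIM (what is proved, stated in full; the proofs are below) =====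
def Claim_equal_expand_wildcards_py : Prop := ∀ (wildcard_perms : List String) (target_perms : List String), Dom_expand_wildcards_py wildcard_perms target_perms → Spec_expand_wildcards_py wildcard_perms target_perms (expand_wildcards_py wildcard_perms target_perms)

-- ===== LEMMAS AND PROOFS =====

-- A's loop is a flatMap over the wildcards
theorem foldA_eq_flatMap (tp : List String) (l : List String) (acc : List String) :
    l.foldl (fun expanded perm =>
      if PySem.Str.endswith perm ".*" then
        expanded ++ tp.filter (fun p => PySem.Str.startswith p (PySem.Str.slice perm none (some (-2)) ++ "."))
      else expanded ++ [perm]) acc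
    = acc ++ l.flatMap (fun perm =>
        if PySem.Str.endswith perm ".*" then
          tp.filter (fun p => PySem.Str.startswith p (PySem.Str.slice perm none (some (-2)) ++ "."))
        else [perm]) := by
  induction l generalizing acc with
  | nil => simp
  | cons h t ih =>
    simp only [List.foldl_cons, List.flatMap_cons, ih]
    split_ifs <;> simp

-- B's partitioning loop is (filter, map∘filter)
theorem foldB_eq_partition (l : List String) (acc : List String × List String) :
    l.foldl (fun ep perm =>
      if PySem.Str.endswith perm ".*" then
        (ep.1, ep.2 ++ [PySem.Str.slice perm none (some (-2)) ++ "."])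
      else (ep.1 ++ [perm], ep.2)) acc
    = (acc.1 ++ l.filter (fun perm => !PySem.Str.endswith perm ".*"),
       acc.2 ++ (l.filter (fun perm => PySem.Str.endswith perm ".*")).map
         (fun perm => PySem.Str.slice perm none (some (-2)) ++ ".")) := by
  induction l generalizing acc with
  | nil => simp
  | cons h t ih =>
    simp only [List.foldl_cons, ih, List.filter_cons]
    by_cases hc : PySem.Str.endswith h ".*" = true <;>
      simp [hc, -PySem.Str.endswith_eq]

theorem expand_wildcards_py_spec : Claim_equal_expand_wildcards_py := by
  intro wp tp _
  show expand_wildcards_py wp tp = expand_wildcards_py_alt wp tp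
  unfold expand_wildcards_py expand_wildcards_py_alt
  simp only [foldA_eq_flatMap, foldB_eq_partition, List.nil_append]
  apply PySem.List.sorted_eq_sorted_of_perm _ _ _ (fun _ _ h => h)
  apply (List.perm_ext_iff_of_nodup (PySem.Set.nodup_ofList _) (PySem.Set.nodup_ofList _)).2
  intro x
  simp only [PySem.Set.mem_ofList, List.mem_flatMap, List.mem_append, List.mem_filter,
    List.mem_map, List.any_eq_true, Bool.not_eq_eq_eq_not, Bool.not_true]
  constructor
  · rintro ⟨w, hw, hx⟩
    by_cases he : PySem.Str.endswith w ".*" = true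
    · rw [if_pos he] at hx
      simp only [List.mem_filter] at hx
      exact Or.inr ⟨hx.1, ⟨_, ⟨w, ⟨hw, he⟩, rfl⟩, hx.2⟩⟩
    · rw [if_neg he] at hx
      simp only [List.mem_singleton] at hx
      subst hx
      exact Or.inl ⟨hw, by simpa using he⟩
  · rintro (⟨hw, he⟩ | ⟨hxt, p, ⟨w, ⟨hw, he⟩, rfl⟩, hst⟩)
    · exact ⟨x, hw, by simp only [he, Bool.false_eq_true, if_false, List.mem_singleton]⟩
    · exact ⟨w, hw, by simp only [if_pos he, List.mem_filter]; exact ⟨hxt, hst⟩⟩
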